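-- pv_equiv track=rewrite | github.com/Sebysemily/Flu | code/build_gisaid_input_from_mira.py | best_expected_length
-- ===== SOURCE A (Python) =====
-- from collections import defaultdict, Counter
--
-- def best_expected_length(lengths):
--     if not lengths:
--         return None
--
--     counts = Counter(lengths)
--     top_n = max(counts.values())
--     modes = [k for k, v in counts.items() if v == top_n]
--
--     if len(modes) == 1:
--         return modes[0]
--
--     return max(lengths)
-- ===== SOURCE B (Python) =====
-- def best_expected_length(lengths):
--     if not lengths:
--         return None
--     srt = sorted(lengths)
--     best_n = 0
--     best_vals = []
--     prev = None
--     run = 0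
--     for x in srt:
--         if prev is not None and x == prev:
--             run += 1
--         else:
--             prev = x
--             run = 1
--         if run > best_n:
--             best_n = run
--             best_vals = [x]
--         elif run == best_n:
--             best_vals.append(x)
--     if len(best_vals) == 1:
--         return best_vals[0]
--     return srt[-1]
-- ===== Notes on version B (the rewrite author's own statement) =====
-- stated objective: alternative
-- what changed: Replaces A's Counter hash-counting plus a comprehension over dict items with a sort followed by a single run-length scan that maintains the best run length and the values achieving it.
import Mathlib
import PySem

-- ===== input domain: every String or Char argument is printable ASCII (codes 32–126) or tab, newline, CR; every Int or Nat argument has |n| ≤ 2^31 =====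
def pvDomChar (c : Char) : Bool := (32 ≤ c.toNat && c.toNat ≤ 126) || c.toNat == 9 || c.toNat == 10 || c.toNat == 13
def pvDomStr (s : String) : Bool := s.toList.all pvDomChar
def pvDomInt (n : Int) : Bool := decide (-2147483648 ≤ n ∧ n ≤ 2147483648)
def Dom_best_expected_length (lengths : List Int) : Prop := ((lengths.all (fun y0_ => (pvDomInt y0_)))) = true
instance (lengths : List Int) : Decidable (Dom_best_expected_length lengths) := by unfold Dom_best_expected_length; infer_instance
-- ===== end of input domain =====

-- B replaces A's Counter/hash-count with a sort-then-scan over runs of equal values (objective: alternative, same result).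

-- ===== PORT A =====
def best_expected_length (lengths : List Int) : Option Int :=
  if lengths = [] then none
  else
    let counts := PySem.Dict.counter lengths
    match PySem.List.max? counts.values (fun v => v) with
    | none => none   -- unreachable: counts is nonempty here, Python's max does not raise
    | some top_n =>
      let modes := (counts.items.filter (fun p => p.2 == top_n)).map (fun p => p.1)
      if modes.length = 1 then PySem.List.pyGet? modes 0
      else PySem.List.max? lengths (fun x => x)

-- ===== PORT B =====
-- loop body of Source B: state = (prev, run, best_n, best_vals)
def bStep (st : Option Int × Int × Int × List Int) (x : Int) : Option Int × Int × Int × List Int :=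
  let run : Int := if st.1 = some x then st.2.1 + 1 else 1
  let prev : Option Int := if st.1 = some x then st.1 else some x
  if run > st.2.2.1 then (prev, run, run, [x])
  else if run = st.2.2.1 then (prev, run, st.2.2.1, st.2.2.2 ++ [x])
  else (prev, run, st.2.2.1, st.2.2.2)

def best_expected_length_alt (lengths : List Int) : Option Int :=
  if lengths = [] then none
  else
    let srt := PySem.List.sorted lengths (fun x => x) false
    let st := srt.foldl bStep (none, 0, 0, [])
    if st.2.2.2.length = 1 then PySem.List.pyGet? st.2.2.2 0
    else PySem.List.pyGet? srt (-1)

-- ===== PRECONDITION & SPEC =====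
def Spec_best_expected_length (lengths : List Int) (out : Option Int) : Prop := out = best_expected_length_alt lengths
instance (lengths : List Int) (out : Option Int) : Decidable (Spec_best_expected_length lengths out) := by unfold Spec_best_expected_length; infer_instance

-- ===== CLAIM (what is proved, stated in full; the proofs are below) =====
def Claim_equal_best_expected_length : Prop := ∀ (lengths : List Int), Dom_best_expected_length lengths → Spec_best_expected_length lengths (best_expected_length lengths)

-- ===== LEMMAS AND PROOFS =====

-- set(p) of a ≤-sorted list is strictly increasing
theorem ofList_pairwise_lt_of_sorted (p : List Int) (h : p.Pairwise (· ≤ ·)) :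
    (PySem.Set.ofList p).Pairwise (· < ·) := by
  induction p using List.reverseRecOn with
  | nil => simp [PySem.Set.ofList]
  | append_singleton q x ih =>
    rw [List.pairwise_append] at h
    obtain ⟨hq, -, hqx⟩ := h
    rw [PySem.Set.ofList_append_singleton]
    by_cases hx : x ∈ PySem.Set.ofList q
    · rw [PySem.Set.add_of_mem hx]; exact ih hq
    · rw [PySem.Set.add_of_not_mem hx]
      rw [List.pairwise_append]
      refine ⟨ih hq, by simp, ?_⟩
      intro a ha b hb
      simp at hb; subst hb
      have ha' : a ∈ q := (PySem.Set.mem_ofList _ _).mp ha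
      have : a ≤ b := hqx a ha' b (by simp)
      have : a ≠ b := fun he => hx (he ▸ ha)
      omega

-- in a strictly increasing list, a member that bounds every element sits at the end
theorem pairwise_lt_last_split (l : List Int) (x : Int) (hp : l.Pairwise (· < ·))
    (hm : x ∈ l) (hb : ∀ y ∈ l, y ≤ x) : ∃ q, l = q ++ [x] ∧ x ∉ q := by
  induction l using List.reverseRecOn with
  | nil => simp at hm
  | append_singleton q a ih =>
    rw [List.pairwise_append] at hp
    obtain ⟨hq, -, hqa⟩ := hp
    have hax : a ≤ x := hb a (by simp)
    rcases List.mem_append.mp hm with hxq | hxa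
    · have : x < a := hqa x hxq a (by simp)
      omega
    · simp at hxa; subst hxa
      exact ⟨q, rfl, fun hxq => by have := hqa x hxq x (by simp); omega⟩

-- the last element of a ≤-sorted nonempty list bounds all elements
theorem sorted_last_max (p : List Int) (h : p.Pairwise (· ≤ ·)) (hne : p ≠ []) :
    ∀ y ∈ p, y ≤ p.getLast hne := by
  induction p using List.reverseRecOn with
  | nil => simp at hne
  | append_singleton q a ih =>
    rw [List.pairwise_append] at h
    obtain ⟨hq, -, hqa⟩ := h
    intro y hy
    simp
    rcases List.mem_append.mp hy with hyq | hya
    · exact hqa y hyq a (by simp)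
    · simp at hya; omega

theorem cnt_app_self (q : List Int) (x : Int) : (((q++[x]).count x : Nat) : Int) = (q.count x : Int) + 1 := by
  simp [List.count_append]

theorem cnt_app_ne (q : List Int) (x v : Int) (h : v ≠ x) : (((q++[x]).count v : Nat) : Int) = (q.count v : Int) := by
  simp [List.count_append, List.count_singleton]
  omega

-- invariant of Source B's scan: after the loop over a ≤-sorted nonempty p, the state is
-- (last value, its multiplicity, the maximal multiplicity b, and the ascending list of values of multiplicity b)
theorem scan_spec (p : List Int) (hp : p.Pairwise (· ≤ ·)) (hne : p ≠ []) :
    ∃ b vals, p.foldl bStep (none, 0, 0, []) =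
        (some (p.getLast hne), ((p.count (p.getLast hne) : Int)), b, vals)
      ∧ (∀ v ∈ p, (p.count v : Int) ≤ b)
      ∧ (∃ v ∈ p, (p.count v : Int) = b)
      ∧ vals = (PySem.Set.ofList p).filter (fun v => ((p.count v : Int) == b)) := by
  induction p using List.reverseRecOn with
  | nil => exact absurd rfl hne
  | append_singleton q x ih =>
    rw [List.pairwise_append] at hp
    obtain ⟨hq, -, hqx⟩ := hp
    have hgl : (q++[x]).getLast hne = x := by simp
    by_cases hq0 : q = []
    · subst hq0
      refine ⟨1, [x], ?_, ?_, ?_, ?_⟩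
      · simp [bStep]
      · intro v hv; simp at hv; subst hv; simp
      · exact ⟨x, by simp, by simp⟩
      · simp [PySem.Set.ofList]
    · obtain ⟨b, vals, hfold, hbound, ⟨w, hw, hwb⟩, hvals⟩ := ih hq hq0
      have hLmem : q.getLast hq0 ∈ q := List.getLast_mem hq0
      have hLmax : ∀ y ∈ q, y ≤ q.getLast hq0 := sorted_last_max q hq hq0
      rw [List.foldl_append, hfold]
      simp only [List.foldl_cons, List.foldl_nil, hgl]
      by_cases hxq : x ∈ q
      · -- x equals the last element of q: the current run continues
        have hLx : q.getLast hq0 = x := le_antisymm (hqx _ hLmem x (by simp)) (hLmax x hxq)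
        rw [hLx]
        have hofq : PySem.Set.ofList (q++[x]) = PySem.Set.ofList q := by
          rw [PySem.Set.ofList_append_singleton, PySem.Set.add_of_mem ((PySem.Set.mem_ofList _ _).mpr hxq)]
        have hcx : (((q++[x]).count x : Nat) : Int) = (q.count x : Int) + 1 := cnt_app_self q x
        by_cases hgt : ((q.count x : Int) + 1) > b
        · refine ⟨(q.count x : Int) + 1, [x], ?_, ?_, ?_, ?_⟩
          · simp only [bStep]
            simp [hgt]
          · intro v hv
            by_cases hvx : v = x
            · subst hvx; rw [hcx]
            · rw [cnt_app_ne q x v hvx]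
              have hv' : v ∈ q := by rcases List.mem_append.mp hv with h|h; exact h; simp at h; exact absurd h hvx
              have := hbound v hv'; omega
          · exact ⟨x, by simp, hcx⟩
          · rw [hofq]
            have : (PySem.Set.ofList q).filter (fun v => (((q++[x]).count v : Nat) : Int) == (q.count x : Int) + 1)
                 = (PySem.Set.ofList q).filter (· == x) := by
              apply List.filter_congr
              intro v hv
              have hv' : v ∈ q := (PySem.Set.mem_ofList _ _).mp hv
              by_cases hvx : v = x
              · subst hvx; simp
              · rw [cnt_app_ne q x v hvx]
                have := hbound v hv'
                simp [hvx]
                omega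
            rw [this, List.filter_beq, List.count_eq_one_of_mem (PySem.Set.nodup_ofList q) ((PySem.Set.mem_ofList _ _).mpr hxq)]
            rfl
        · by_cases heq : ((q.count x : Int) + 1) = b
          · -- the run reaches the current best: x is appended to best_vals
            obtain ⟨Q, hQ, hxQ⟩ := pairwise_lt_last_split (PySem.Set.ofList q) x
              (ofList_pairwise_lt_of_sorted q hq) ((PySem.Set.mem_ofList _ _).mpr hxq)
              (fun y hy => hLx ▸ hLmax y ((PySem.Set.mem_ofList _ _).mp hy))
            refine ⟨b, vals ++ [x], ?_, ?_, ?_, ?_⟩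
            · simp only [bStep]
              simp [heq]
            · intro v hv
              by_cases hvx : v = x
              · subst hvx; rw [hcx]; omega
              · rw [cnt_app_ne q x v hvx]
                have hv' : v ∈ q := by rcases List.mem_append.mp hv with h|h; exact h; simp at h; exact absurd h hvx
                exact hbound v hv'
            · exact ⟨x, by simp, by rw [hcx]; omega⟩
            · have h1 : Q.filter (fun v => (((q++[x]).count v : Nat) : Int) == b)
                      = Q.filter (fun v => ((q.count v : Nat) : Int) == b) := by
                apply List.filter_congr
                intro v hv
                have hvx : v ≠ x := fun he => hxQ (he ▸ hv)
                rw [cnt_app_ne q x v hvx]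
              have h2 : [x].filter (fun v => (((q++[x]).count v : Nat) : Int) == b) = [x] := by
                simp [heq]
              have h3 : [x].filter (fun v => ((q.count v : Nat) : Int) == b) = [] := by
                simp; omega
              rw [hvals, hQ, List.filter_append, hofq, hQ, List.filter_append, h1, h2, h3]
              simp
          · -- the run stays below the best: state unchanged except prev/run
            refine ⟨b, vals, ?_, ?_, ?_, ?_⟩
            · simp only [bStep]
              simp [hgt, heq]
            · intro v hv
              by_cases hvx : v = x
              · subst hvx; rw [hcx]; omega
              · rw [cnt_app_ne q x v hvx]
                have hv' : v ∈ q := by rcases List.mem_append.mp hv with h|h; exact h; simp at h; exact absurd h hvx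
                exact hbound v hv'
            · refine ⟨w, by simp [hw], ?_⟩
              have hwx : w ≠ x := by
                intro he; subst he; omega
              rw [cnt_app_ne q x w hwx]; exact hwb
            · rw [hofq, hvals]
              apply (List.filter_congr ?_).symm
              intro v hv
              by_cases hvx : v = x
              · subst hvx; simp; constructor <;> intro <;> omega
              · rw [cnt_app_ne q x v hvx]
      · -- x is a new value: the run resets to 1
        have hLx : ¬ (some (q.getLast hq0) = some x) := by
          simp; intro he; exact hxq (he ▸ hLmem)
        have hcx : (((q++[x]).count x : Nat) : Int) = 1 := by
          simp [List.count_append, List.count_eq_zero_of_not_mem hxq]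
        have hb1 : 1 ≤ b := by
          have : 1 ≤ q.count w := List.one_le_count_iff.mpr hw
          omega
        have hof : PySem.Set.ofList (q++[x]) = PySem.Set.ofList q ++ [x] := by
          rw [PySem.Set.ofList_append_singleton, PySem.Set.add_of_not_mem
            (fun h => hxq ((PySem.Set.mem_ofList _ _).mp h))]
        by_cases heq : (1 : Int) = b
        · refine ⟨b, vals ++ [x], ?_, ?_, ?_, ?_⟩
          · simp only [bStep]
            simp [hLx, List.count_eq_zero_of_not_mem hxq, ← heq]
          · intro v hv
            by_cases hvx : v = x
            · subst hvx; rw [hcx]; omega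
            · rw [cnt_app_ne q x v hvx]
              have hv' : v ∈ q := by rcases List.mem_append.mp hv with h|h; exact h; simp at h; exact absurd h hvx
              exact hbound v hv'
          · exact ⟨x, by simp, by rw [hcx]; omega⟩
          · rw [hof, List.filter_append, hvals]
            have h1 : (PySem.Set.ofList q).filter (fun v => (((q++[x]).count v : Nat) : Int) == b)
                    = (PySem.Set.ofList q).filter (fun v => ((q.count v : Nat) : Int) == b) := by
              apply List.filter_congr
              intro v hv
              have hvx : v ≠ x := fun he => hxq (he ▸ (PySem.Set.mem_ofList _ _).mp hv)
              rw [cnt_app_ne q x v hvx]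
            rw [h1]
            simp [List.count_eq_zero_of_not_mem hxq, ← heq]
        · have hlt : (1:Int) < b := by omega
          refine ⟨b, vals, ?_, ?_, ?_, ?_⟩
          · have hngt : ¬((1:Int) > b) := by omega
            simp only [bStep]
            simp [hLx, hngt, heq, List.count_eq_zero_of_not_mem hxq]
          · intro v hv
            by_cases hvx : v = x
            · subst hvx; rw [hcx]; omega
            · rw [cnt_app_ne q x v hvx]
              have hv' : v ∈ q := by rcases List.mem_append.mp hv with h|h; exact h; simp at h; exact absurd h hvx
              exact hbound v hv'
          · refine ⟨w, by simp [hw], ?_⟩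
            have hwx : w ≠ x := fun he => hxq (he ▸ hw)
            rw [cnt_app_ne q x w hwx]; exact hwb
          · rw [hof, List.filter_append, hvals]
            have h1 : (PySem.Set.ofList q).filter (fun v => (((q++[x]).count v : Nat) : Int) == b)
                    = (PySem.Set.ofList q).filter (fun v => ((q.count v : Nat) : Int) == b) := by
              apply List.filter_congr
              intro v hv
              have hvx : v ≠ x := fun he => hxq (he ▸ (PySem.Set.mem_ofList _ _).mp hv)
              rw [cnt_app_ne q x v hvx]
            rw [h1]
            simp [List.count_eq_zero_of_not_mem hxq]
            omega

-- Counter(lengths).values() as a map over the distinct values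
theorem values_counter_eq (l : List Int) :
    (PySem.Dict.counter l).values = (PySem.Set.ofList l).map (fun k => ((l.count k : Nat) : Int)) := by
  simp [PySem.Dict.values, PySem.Dict.items_counter, List.map_map]

-- A's modes list as a filter over the distinct values
theorem modes_eq (l : List Int) (t : Int) :
    ((PySem.Dict.counter l).items.filter (fun p => p.2 == t)).map (fun p => p.1)
    = (PySem.Set.ofList l).filter (fun k => ((l.count k : Nat) : Int) == t) := by
  rw [PySem.Dict.items_counter, List.filter_map, List.map_map]
  simp only [Function.comp_def]
  simp

-- ===== VERDICT (by name: the statement is the Claim_ definition above) =====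
theorem best_expected_length_spec : Claim_equal_best_expected_length := by
  unfold Claim_equal_best_expected_length
  intro lengths _
  unfold Spec_best_expected_length
  by_cases h0 : lengths = []
  · subst h0; rfl
  · have hsne : PySem.List.sorted lengths (fun x => x) false ≠ [] := by
      intro h; exact h0 ((PySem.List.sorted_eq_nil_iff _ _ _).mp h)
    have hperm : (PySem.List.sorted lengths (fun x => x) false).Perm lengths :=
      PySem.List.sorted_perm _ _ _
    have hpair : (PySem.List.sorted lengths (fun x => x) false).Pairwise (· ≤ ·) :=
      PySem.List.sorted_pairwise _ _
    obtain ⟨b, vals, hfold, hbound, ⟨w, hw, hwb⟩, hvals⟩ := scan_spec _ hpair hsne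
    have hcnt : ∀ v : Int, (PySem.List.sorted lengths (fun x => x) false).count v = lengths.count v :=
      fun v => hperm.count_eq v
    obtain ⟨y, hy⟩ : ∃ y, y ∈ lengths := List.exists_mem_of_ne_nil lengths h0
    rcases hmax : PySem.List.max? (PySem.Dict.counter lengths).values (fun v => v) with _ | top
    · exfalso
      have h1 := (PySem.List.max?_eq_none_iff _ _).mp hmax
      rw [values_counter_eq] at h1
      have h2 : PySem.Set.ofList lengths = [] := by simpa using h1
      have h3 := (PySem.Set.mem_ofList lengths y).mpr hy
      rw [h2] at h3
      simp at h3
    · -- top is the maximal multiplicity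
      have htopmem : ∃ k ∈ lengths, ((lengths.count k : Nat) : Int) = top := by
        have := PySem.List.max?_mem hmax
        rw [values_counter_eq] at this
        obtain ⟨k, hk, hk2⟩ := List.mem_map.mp this
        exact ⟨k, (PySem.Set.mem_ofList _ _).mp hk, hk2⟩
      have htopmax : ∀ v ∈ lengths, ((lengths.count v : Nat) : Int) ≤ top := by
        intro v hv
        have hmem : ((lengths.count v : Nat) : Int) ∈ (PySem.Dict.counter lengths).values := by
          rw [values_counter_eq]
          exact List.mem_map.mpr ⟨v, (PySem.Set.mem_ofList _ _).mpr hv, rfl⟩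
        exact PySem.List.max?_isMax hmax _ hmem
      -- b = top
      have hbtop : b = top := by
        obtain ⟨k, hk, hk2⟩ := htopmem
        have h1 : top ≤ b := by
          have hks : k ∈ PySem.List.sorted lengths (fun x => x) false := hperm.mem_iff.mpr hk
          have := hbound k hks
          rw [hcnt k] at this
          omega
        have h2 : b ≤ top := by
          have hws : w ∈ lengths := hperm.mem_iff.mp hw
          have := htopmax w hws
          rw [hcnt w] at hwb
          omega
        omega
      -- the two candidate lists are permutations of each other
      have nodA : ((PySem.Set.ofList lengths).filter
          (fun k => ((lengths.count k : Nat) : Int) == top)).Nodup :=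
        (PySem.Set.nodup_ofList lengths).filter _
      have nodB : vals.Nodup := by
        rw [hvals]; exact (PySem.Set.nodup_ofList _).filter _
      have hpermAB : ((PySem.Set.ofList lengths).filter
          (fun k => ((lengths.count k : Nat) : Int) == top)).Perm vals := by
        rw [List.perm_ext_iff_of_nodup nodA nodB]
        intro v
        rw [hvals]
        simp only [List.mem_filter, PySem.Set.mem_ofList, hcnt, hperm.mem_iff, hbtop]
      -- unfold both ports and compare branch by branch
      simp only [best_expected_length, best_expected_length_alt, if_neg h0, hmax, hfold, modes_eq]
      by_cases hl1 : ((PySem.Set.ofList lengths).filter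
          (fun k => ((lengths.count k : Nat) : Int) == top)).length = 1
      · rw [if_pos hl1, if_pos (by rw [← hpermAB.length_eq]; exact hl1)]
        obtain ⟨m, hm⟩ := List.length_eq_one_iff.mp hl1
        have hB : vals = [m] := by
          rw [hm] at hpermAB
          exact (List.perm_singleton.mp hpermAB.symm)
        rw [hm, hB]
      · rw [if_neg hl1, if_neg (by rw [← hpermAB.length_eq]; exact hl1)]
        rcases List.eq_nil_or_concat (PySem.List.sorted lengths (fun x => x) false) with h | ⟨q, a, hqa⟩
        · exact absurd h hsne
        · rw [List.concat_eq_append] at hqa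
          rw [hqa]
          have hget : PySem.List.pyGet? (q ++ [a]) (-1) = some a := by
            simp [PySem.List.pyGet?, PySem.List.pyIdx?]
          rw [hget]
          rcases hmax2 : PySem.List.max? lengths (fun x => x) with _ | m
          · exact absurd ((PySem.List.max?_eq_none_iff _ _).mp hmax2) h0
          · have hmmem : m ∈ lengths := PySem.List.max?_mem hmax2
            have hmmax : ∀ v ∈ lengths, v ≤ m := fun v hv => PySem.List.max?_isMax hmax2 v hv
            have hamem : a ∈ lengths := by
              have : a ∈ q ++ [a] := by simp
              rw [← hqa] at this
              exact hperm.mem_iff.mp this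
            have ham : a = m := by
              have h1 : a ≤ m := hmmax a hamem
              have h2 : m ≤ a := by
                have hms : m ∈ PySem.List.sorted lengths (fun x => x) false := hperm.mem_iff.mpr hmmem
                have hlast := sorted_last_max _ hpair hsne m hms
                have h4 : (PySem.List.sorted lengths (fun x => x) false).getLast? = some a := by
                  rw [hqa]; simp
                rw [List.getLast?_eq_some_getLast hsne] at h4
                simp only [Option.some.injEq] at h4
                rw [h4] at hlast
                exact hlast
              omega
            rw [ham]
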